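-- pv_equiv track=rewrite | github.com/vikikkdi/depthseperablecnn | depth_seperable_cnn.py | zero_pad
-- ===== SOURCE A (Python) =====
-- def zero_pad(inp, c, h, w, k_h, k_w):
-- 	'''
-- 		padding the input array using SAME padding where we add equal number of
-- 		zeros for both row and column
-- 	'''
-- 	p1, p2 = int((k_h-1)/2), int((k_w-1)/2)
-- 	out_h, out_w = 2*p1+h, 2*p2+w
-- 	out = []
--
-- 	for i in range(c):
-- 		x = []
-- 		for i in range(out_h):
-- 			y = [0 for _ in range(out_w)]
-- 			x.append(y)
-- 		out.append(x)
--
-- 	for i in range(c):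
-- 		for j in range(h):
-- 			for k in range(w):
-- 				out[i][p1+j][p2+k] = inp[i][j][k]
--
-- 	return [out, p1, p2]
-- ===== SOURCE B (Python) =====
-- def zero_pad(inp, c, h, w, k_h, k_w):
--     '''SAME padding: assemble each padded channel row by row instead of
--     allocating a zero grid and overwriting its interior.'''
--     p1, p2 = int((k_h - 1) / 2), int((k_w - 1) / 2)
--     out_w = 2 * p2 + w
--     out = []
--     for i in range(c):
--         top = [[0] * out_w for _ in range(p1)]
--         mid = [[0] * p2 + [inp[i][j][k] for k in range(w)] + [0] * p2
--                for j in range(h)]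
--         bot = [[0] * out_w for _ in range(p1)]
--         out.append(top + mid + bot)
--     return [out, p1, p2]
-- ===== Notes on version B (the rewrite author's own statement) =====
-- stated objective: simpler
-- what changed: B assembles each padded channel directly, row by row (p1 zero rows, then each input row wrapped as [0]*p2 + row + [0]*p2, then p1 zero rows), replacing A's two-pass structure of allocating a full zero grid and then overwriting its interior with a triple nested index-assignment loop.
-- outside the precondition, e.g. on zero_pad([[[5]]], 1, 1, -1, 1, 3): A returns ([[[0]]], 0, 1), B returns ([[[0, 0]]], 0, 1); on zero_pad([], 1, -2, 0, 3, 1): A returns ([[]], 1, 0), B returns ([[[], []]], 1, 0); on zero_pad([], 1, 4, 0, -3, 1): A returns ([[]], -2, 0), B returns ([[[], [], [], []]], -2, 0)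
import Mathlib
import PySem

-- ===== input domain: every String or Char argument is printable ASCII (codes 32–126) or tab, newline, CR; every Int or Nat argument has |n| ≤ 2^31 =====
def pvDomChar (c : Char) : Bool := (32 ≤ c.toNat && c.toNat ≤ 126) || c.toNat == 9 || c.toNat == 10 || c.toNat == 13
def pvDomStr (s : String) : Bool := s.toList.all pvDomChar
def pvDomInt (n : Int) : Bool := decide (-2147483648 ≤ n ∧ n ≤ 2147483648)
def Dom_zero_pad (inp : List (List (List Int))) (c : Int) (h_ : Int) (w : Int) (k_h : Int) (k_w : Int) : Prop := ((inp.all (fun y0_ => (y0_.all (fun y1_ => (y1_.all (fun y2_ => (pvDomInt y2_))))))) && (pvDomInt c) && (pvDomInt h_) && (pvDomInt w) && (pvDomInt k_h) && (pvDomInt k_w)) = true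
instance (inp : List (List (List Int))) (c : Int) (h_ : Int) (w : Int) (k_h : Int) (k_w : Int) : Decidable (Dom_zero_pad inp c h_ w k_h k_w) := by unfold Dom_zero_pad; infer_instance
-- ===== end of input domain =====

-- B assembles each padded channel row by row (top zero rows ++ padded input rows ++ bottom
-- zero rows) instead of A's two passes (allocate a zero grid, then overwrite its interior);
-- equal return values are proved on Pre_zero_pad.

-- shared helper: the read inp[i][j][k] (under Pre_ all three indices are in range, so the
-- `getD` defaults are never used; both ports read through this same expression)
def pvGet3 (inp : List (List (List Int))) (i j k : Nat) : Int :=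
  ((PySem.List.pyGet? ((PySem.List.pyGet? ((PySem.List.pyGet? inp (i : Int)).getD []) (j : Int)).getD []) (k : Int)).getD 0)

-- ===== PORT A =====
-- `int((k_h-1)/2)` is true division to float then truncation: exact as Int.tdiv for
-- |k_h| ≤ 2^31 (the float quotient is exact there) — PySem.Int.truncdiv is Int.tdiv.
-- `range(n)` with n possibly negative is `List.range n.toNat` (empty for n ≤ 0, exact).
-- The assignment out[i][p1+j][p2+k] = v is List.modify/List.set at the `.toNat` of the
-- index: under Pre_ every index is nonnegative and in range, so this is exact.
def zero_pad (inp : List (List (List Int))) (c : Int) (h_ : Int) (w : Int) (k_h : Int) (k_w : Int) : List (List (List Int)) × Int × Int :=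
  let p1 : Int := Int.tdiv (k_h - 1) 2
  let p2 : Int := Int.tdiv (k_w - 1) 2
  let out_h : Int := 2 * p1 + h_
  let out_w : Int := 2 * p2 + w
  -- first pass: out = c channels, each out_h rows of out_w zeros, built by .append loops
  let out0 : List (List (List Int)) :=
    (List.range c.toNat).foldl (fun out _ =>
      let x : List (List Int) :=
        (List.range out_h.toNat).foldl (fun x _ =>
          let y : List Int := (List.range out_w.toNat).map (fun _ => (0 : Int))
          x ++ [y]) []
      out ++ [x]) []
  -- second pass: overwrite the interior entries with inp
  let out :=
    (List.range c.toNat).foldl (fun out i =>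
      (List.range h_.toNat).foldl (fun out j =>
        (List.range w.toNat).foldl (fun out k =>
          out.modify i (fun ch =>
            ch.modify (p1 + (j : Int)).toNat (fun row =>
              row.set (p2 + (k : Int)).toNat (pvGet3 inp i j k)))) out) out) out0
  (out, p1, p2)

-- ===== PORT B =====
-- Source B: each channel is top ++ mid ++ bot; `[0]*n` is List.replicate n.toNat 0.
def zero_pad_alt (inp : List (List (List Int))) (c : Int) (h_ : Int) (w : Int) (k_h : Int) (k_w : Int) : List (List (List Int)) × Int × Int :=
  let p1 : Int := Int.tdiv (k_h - 1) 2
  let p2 : Int := Int.tdiv (k_w - 1) 2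
  let out_w : Int := 2 * p2 + w
  let out : List (List (List Int)) :=
    (List.range c.toNat).map (fun i =>
      let top := List.replicate p1.toNat (List.replicate out_w.toNat (0 : Int))
      let mid := (List.range h_.toNat).map (fun j =>
        List.replicate p2.toNat (0 : Int)
          ++ (List.range w.toNat).map (fun k => pvGet3 inp i j k)
          ++ List.replicate p2.toNat (0 : Int))
      let bot := List.replicate p1.toNat (List.replicate out_w.toNat (0 : Int))
      top ++ mid ++ bot)
  (out, p1, p2)

-- ===== PRECONDITION & SPEC =====
-- Pre_ excludes (a) shape-mismatched inputs, on which A raises IndexError, and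
-- (b) inputs with c > 0, h_ ≠ 0 and a negative h_, w, k_h or k_w: negative padding
-- would make A's fill use Python's negative-index wraparound, and with negative
-- dimensions A's grid sizing 2*p+dim and empty fill loops yield accidental shapes
-- (see the cited examples); both corners are artefacts no caller of SAME padding
-- exercises.  The degenerate combinations c ≤ 0, h_ = 0, (h_ ≤ 0 with k_h ≤ 2:
-- both sides produce empty channels) and (w ≤ 0 with k_w ≤ 2 and 0 ≤ k_h, 0 ≤ h_:
-- both sides produce empty rows) ARE admitted and proved equal, and the shape
-- conjunct only binds when 0 < h_ and 0 < w, because A touches inp only then.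
def Pre_zero_pad (inp : List (List (List Int))) (c : Int) (h_ : Int) (w : Int) (k_h : Int) (k_w : Int) : Prop :=
  c ≤ 0 ∨ h_ = 0 ∨ (h_ ≤ 0 ∧ k_h ≤ 2) ∨ (0 ≤ k_h ∧ 0 ≤ h_ ∧ w ≤ 0 ∧ k_w ≤ 2) ∨
  (0 ≤ k_h ∧ 0 ≤ k_w ∧ 0 ≤ h_ ∧ 0 ≤ w ∧
    (0 < h_ → 0 < w →
      c.toNat ≤ inp.length ∧
      ∀ ch ∈ inp.take c.toNat, h_.toNat ≤ ch.length ∧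
        ∀ row ∈ ch.take h_.toNat, w.toNat ≤ row.length))
instance (inp : List (List (List Int))) (c : Int) (h_ : Int) (w : Int) (k_h : Int) (k_w : Int) : Decidable (Pre_zero_pad inp c h_ w k_h k_w) := by unfold Pre_zero_pad; infer_instance

def pvWitness_zero_pad : List (List (List Int)) × Int × Int × Int × Int × Int :=
  ([[[1, 2], [3, 4]]], 1, 2, 2, 3, 3)

def Spec_zero_pad (inp : List (List (List Int))) (c : Int) (h_ : Int) (w : Int) (k_h : Int) (k_w : Int) (out : List (List (List Int)) × Int × Int) : Prop := out = zero_pad_alt inp c h_ w k_h k_w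
instance (inp : List (List (List Int))) (c : Int) (h_ : Int) (w : Int) (k_h : Int) (k_w : Int) (out : List (List (List Int)) × Int × Int) : Decidable (Spec_zero_pad inp c h_ w k_h k_w out) := by unfold Spec_zero_pad; infer_instance

-- ===== CLAIM (what is proved, stated in full; the proofs are below) =====
def Claim_equal_zero_pad : Prop := ∀ (inp : List (List (List Int))) (c : Int) (h_ : Int) (w : Int) (k_h : Int) (k_w : Int), Dom_zero_pad inp c h_ w k_h k_w → Pre_zero_pad inp c h_ w k_h k_w → Spec_zero_pad inp c h_ w k_h k_w (zero_pad inp c h_ w k_h k_w)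

-- ===== LEMMAS AND PROOFS =====

-- truncating division by 2 of anything ≤ 1 is ≤ 0
theorem pv_tdiv2_nonpos (a : Int) (h : a ≤ 1) : Int.tdiv a 2 ≤ 0 := by
  rcases (by omega : a ≤ 0 ∨ a = 1) with ha | ha
  · have h1 : (0 : Int) ≤ -a := by omega
    have h2 := Int.tdiv_nonneg h1 (by norm_num : (0 : Int) ≤ 2)
    rw [Int.neg_tdiv] at h2; omega
  · rw [ha]; decide

-- A's append loop builds a replicate
theorem pv_foldl_append_const {α : Type} (n : Nat) (x : α) (l : List α) :
    (List.range n).foldl (fun acc _ => acc ++ [x]) l = l ++ List.replicate n x := by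
  induction n generalizing l with
  | zero => simp
  | succ n ih =>
    rw [List.range_succ, List.foldl_append]
    simp [ih, List.replicate_succ']

-- a fold whose every step modifies the SAME index i is one modify by the composed function
theorem pv_foldl_modify_comp {α β : Type} (i : Nat) (g : β → α → α) (xs : List β)
    (o : List α) :
    xs.foldl (fun o b => o.modify i (g b)) o
      = o.modify i (fun a => xs.foldl (fun a b => g b a) a) := by
  induction xs generalizing o with
  | nil => exact (List.modify_id i o).symm
  | cons b bs ih =>
    simp only [List.foldl_cons, ih, List.modify_modify_eq]
    rfl

-- modify past a prefix acts on the suffix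
theorem pv_modify_append {α : Type} (l t : List α) (i : Nat) (f : α → α) :
    (l ++ t).modify (l.length + i) f = l ++ t.modify i f := by
  induction l with
  | nil => simp
  | cons x xs ih => simpa [Nat.succ_add] using ih

-- a fold over range n modifying index p+j of a replicate block turns the middle block
-- into the mapped rows and leaves the borders untouched
theorem pv_foldl_modify_offset {α : Type} (T : Nat → α → α) (p n m : Nat) (X : α) :
    (List.range n).foldl (fun l j => l.modify (p + j) (T j))
        (List.replicate p X ++ List.replicate n X ++ List.replicate m X)
      = List.replicate p X ++ (List.range n).map (fun j => T j X) ++ List.replicate m X := by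
  induction n generalizing m with
  | zero => simp
  | succ n ih =>
    rw [List.range_succ, List.foldl_append]
    have h1 : List.replicate (n + 1) X = List.replicate n X ++ [X] := List.replicate_succ' ..
    have h2 : List.replicate (m + 1) X = X :: List.replicate m X := List.replicate_succ ..
    have hstart : List.replicate p X ++ List.replicate (n + 1) X ++ List.replicate m X
        = List.replicate p X ++ List.replicate n X ++ List.replicate (m + 1) X := by
      rw [h1, h2]; simp only [List.append_assoc, List.cons_append, List.nil_append]
    rw [hstart, ih]
    simp only [List.foldl_cons, List.foldl_nil, h2]
    have hlen : (List.replicate p X ++ (List.range n).map (fun j => T j X)).length = p + n := by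
      simp
    have happ := pv_modify_append (List.replicate p X ++ (List.range n).map (fun j => T j X))
      (X :: List.replicate m X) 0 (T n)
    rw [hlen, Nat.add_zero] at happ
    rw [List.append_assoc, ← List.append_assoc, happ]
    simp

-- List.set as a modify (to feed the offset lemma at the row level)
theorem pv_set_eq_modify {α : Type} (l : List α) (i : Nat) (a : α) :
    l.set i a = l.modify i (fun _ => a) := by
  induction l generalizing i with
  | nil => simp
  | cons x xs ih =>
    cases i with
    | zero => simp [List.modify]
    | succ i => simp [List.modify, ih]

-- the fill fold over range n of modify-at-its-own-index, started on a replicate,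
-- is a map (the p = 0, m = 0 instance of the offset lemma)
theorem pv_foldl_modify_range {α : Type} (T : Nat → α → α) (n : Nat) (X : α) :
    (List.range n).foldl (fun o i => o.modify i (T i)) (List.replicate n X)
      = (List.range n).map (fun i => T i X) := by
  have h := pv_foldl_modify_offset T 0 n 0 X
  simpa using h

-- ===== VERDICT (by name: the statement is the Claim_ definition above) =====
theorem zero_pad_spec : Claim_equal_zero_pad := by
  intro inp c h_ w k_h k_w _hDom hPre
  unfold Spec_zero_pad zero_pad zero_pad_alt
  simp only []
  set p1 : Int := Int.tdiv (k_h - 1) 2 with hp1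
  set p2 : Int := Int.tdiv (k_w - 1) 2 with hp2
  rcases hPre with hc | hh0 | ⟨hhle, hk2⟩ | ⟨hkh4, hh4, hw4, hkw4⟩ | ⟨hkh, hkw, hh, hw, _hShape⟩
  -- c ≤ 0: both programs run no loops and return ([], p1, p2)
  · have hc0 : c.toNat = 0 := by omega
    simp [hc0]
  -- h_ = 0: A's fill loop is empty, so both sides are c channels of 2*p1 zero rows
  · have hh0' : h_.toNat = 0 := by omega
    have hout_h : (2 * p1 + h_).toNat = p1.toNat + p1.toNat := by omega
    refine Prod.ext ?_ rfl
    simp only [hh0', hout_h, List.range_zero, List.foldl_nil, List.map_nil,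
      List.nil_append, List.append_nil, pv_foldl_append_const]
    rw [List.replicate_add]
    simp [List.map_const']
  -- h_ ≤ 0 and k_h ≤ 2: p1 ≤ 0, so both sides are c empty channels
  · have hp1le : p1 ≤ 0 := by rw [hp1]; exact pv_tdiv2_nonpos _ (by omega)
    refine Prod.ext ?_ rfl
    have e1 : h_.toNat = 0 := by omega
    have e2 : (2 * p1 + h_).toNat = 0 := by omega
    have e3 : p1.toNat = 0 := by omega
    simp [e1, e2, e3, List.foldl_fixed]
  -- w ≤ 0 and k_w ≤ 2 (with 0 ≤ k_h, 0 ≤ h_): p2 ≤ 0, so every row is empty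
  · have hp1n : 0 ≤ p1 := by
      rcases eq_or_lt_of_le hkh4 with h | h
      · rw [hp1, ← h]; decide
      · rw [hp1]; exact Int.tdiv_nonneg (by omega) (by omega)
    have hp2le : p2 ≤ 0 := by rw [hp2]; exact pv_tdiv2_nonpos _ (by omega)
    refine Prod.ext ?_ rfl
    have e1 : w.toNat = 0 := by omega
    have e2 : (2 * p2 + w).toNat = 0 := by omega
    have e3 : p2.toNat = 0 := by omega
    have e4 : (2 * p1 + h_).toNat = p1.toNat + h_.toNat + p1.toNat := by omega
    simp only [e1, e2, e3, e4, List.range_zero, List.foldl_nil, List.map_nil,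
      List.replicate_zero, List.nil_append, List.append_nil, List.foldl_fixed,
      pv_foldl_append_const]
    rw [List.replicate_add, List.replicate_add]
    simp [List.map_const']
  have hp1n : 0 ≤ p1 := by
    rcases eq_or_lt_of_le hkh with h | h
    · rw [hp1, ← h]; decide
    · rw [hp1]; exact Int.tdiv_nonneg (by omega) (by omega)
  have hp2n : 0 ≤ p2 := by
    rcases eq_or_lt_of_le hkw with h | h
    · rw [hp2, ← h]; decide
    · rw [hp2]; exact Int.tdiv_nonneg (by omega) (by omega)
  refine Prod.ext ?_ rfl
  simp only []
  -- name the Nat sizes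
  have hOH : (2 * p1 + h_).toNat = p1.toNat + h_.toNat + p1.toNat := by omega
  have hOW : (2 * p2 + w).toNat = p2.toNat + w.toNat + p2.toNat := by omega
  have hPJ : ∀ j : Nat, (p1 + (j : Int)).toNat = p1.toNat + j := by intro j; omega
  have hPK : ∀ k : Nat, (p2 + (k : Int)).toNat = p2.toNat + k := by intro k; omega
  -- the zero row and channel of A's first pass
  have hrow0 : (List.range (2 * p2 + w).toNat).map (fun _ => (0 : Int))
      = List.replicate (2 * p2 + w).toNat 0 := by
    simp [List.map_const']
  -- A's first pass is a replicate of replicates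
  have hout0 :
      (List.range c.toNat).foldl (fun out _ =>
        out ++ [(List.range (2 * p1 + h_).toNat).foldl (fun x _ =>
          x ++ [(List.range (2 * p2 + w).toNat).map (fun _ => (0 : Int))]) []]) []
      = List.replicate c.toNat
          (List.replicate (2 * p1 + h_).toNat (List.replicate (2 * p2 + w).toNat 0)) := by
    rw [pv_foldl_append_const]
    rw [pv_foldl_append_const, hrow0]
    simp
  rw [hout0]
  -- collapse the k- and j-folds into a single modify per channel
  simp only [pv_foldl_modify_comp]
  -- A's fill fold is now `modify i (chT i)` over a replicate: it is a map
  refine Eq.trans (pv_foldl_modify_range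
    (fun i ch => (List.range h_.toNat).foldl (fun ch j =>
        ch.modify (p1 + (j : Int)).toNat (fun row =>
          (List.range w.toNat).foldl (fun row k =>
            row.set (p2 + (k : Int)).toNat (pvGet3 inp i j k)) row)) ch)
    c.toNat
    (List.replicate (2 * p1 + h_).toNat (List.replicate (2 * p2 + w).toNat 0))) ?_
  apply List.map_congr_left
  intro i _
  -- channel level: rewrite the index and split the replicate into top / middle / bottom
  simp only [hPJ]
  rw [hOH, show List.replicate (p1.toNat + h_.toNat + p1.toNat)
        (List.replicate (2 * p2 + w).toNat (0 : Int))
      = List.replicate p1.toNat (List.replicate (2 * p2 + w).toNat 0)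
        ++ List.replicate h_.toNat (List.replicate (2 * p2 + w).toNat 0)
        ++ List.replicate p1.toNat (List.replicate (2 * p2 + w).toNat 0) by
      rw [List.replicate_add, List.replicate_add]]
  refine Eq.trans (pv_foldl_modify_offset
    (fun j row => (List.range w.toNat).foldl (fun row k =>
        row.set (p2 + (k : Int)).toNat (pvGet3 inp i j k)) row)
    p1.toNat h_.toNat p1.toNat (List.replicate (2 * p2 + w).toNat 0)) ?_
  congr 2
  apply List.map_congr_left
  intro j _
  -- row level: the set-fold on a zero row builds B's padded row
  simp only [pv_set_eq_modify, hPK]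
  rw [hOW, show List.replicate (p2.toNat + w.toNat + p2.toNat) (0 : Int)
      = List.replicate p2.toNat 0 ++ List.replicate w.toNat 0 ++ List.replicate p2.toNat 0 by
      rw [List.replicate_add, List.replicate_add]]
  exact pv_foldl_modify_offset (fun k _ => pvGet3 inp i j k) p2.toNat w.toNat p2.toNat 0
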